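-- pv_equiv track=rewrite | github.com/alzweidi/land-intel-core | python/landintel/scoring/quality.py | derive_source_coverage_quality
-- ===== SOURCE A (Python) =====
-- from typing import Any
--
-- def derive_source_coverage_quality(coverage_json: dict[str, Any]) -> str:
--     rows = list(coverage_json.get("source_coverage") or [])
--     if not rows:
--         return "LOW"
--     statuses = {str(row.get("coverage_status") or "UNKNOWN").upper() for row in rows}
--     freshness = {str(row.get("freshness_status") or "UNKNOWN").upper() for row in rows}
--     if "MISSING" in statuses:
--         return "LOW"
--     if "PARTIAL" in statuses or "STALE" in freshness or "UNKNOWN" in freshness: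
--         return "MEDIUM"
--     return "HIGH"
-- ===== SOURCE B (Python) =====
-- def derive_source_coverage_quality(coverage_json: dict) -> str:
--     rows = list(coverage_json.get("source_coverage") or [])
--     if not rows:
--         return "LOW"
--
--     def row_quality(row):
--         status = str(row.get("coverage_status") or "UNKNOWN").upper()
--         if status == "MISSING":
--             return 0
--         fresh = str(row.get("freshness_status") or "UNKNOWN").upper()
--         if status == "PARTIAL" or fresh in ("STALE", "UNKNOWN"):
--             return 1
--         return 2
--
--     return ["LOW", "MEDIUM", "HIGH"][min(map(row_quality, rows))]
-- ===== Notes on version B (the rewrite author's own statement) =====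
-- stated objective: alternative
-- what changed: Replaces building two global status/freshness sets with staged membership tests by a per-row quality score (0/1/2) aggregated with a single min over rows, then indexed into the LOW/MEDIUM/HIGH ordering.
import Mathlib
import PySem

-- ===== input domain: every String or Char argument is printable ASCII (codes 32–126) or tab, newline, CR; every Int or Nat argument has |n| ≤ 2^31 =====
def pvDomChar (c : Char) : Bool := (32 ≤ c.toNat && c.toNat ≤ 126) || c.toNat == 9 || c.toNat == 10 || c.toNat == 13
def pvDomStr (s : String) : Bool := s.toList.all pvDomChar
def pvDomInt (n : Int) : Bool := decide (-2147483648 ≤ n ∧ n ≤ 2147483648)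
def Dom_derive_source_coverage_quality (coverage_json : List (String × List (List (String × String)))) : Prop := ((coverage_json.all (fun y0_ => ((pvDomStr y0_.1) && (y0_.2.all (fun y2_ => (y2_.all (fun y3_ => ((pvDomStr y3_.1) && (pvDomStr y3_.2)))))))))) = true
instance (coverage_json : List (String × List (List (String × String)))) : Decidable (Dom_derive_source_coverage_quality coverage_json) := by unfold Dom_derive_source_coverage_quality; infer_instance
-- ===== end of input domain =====

-- B replaces A's two global status sets and staged membership tests by a per-row
-- quality score aggregated with one min over rows (alternative decomposition, same cost).

-- shared helper: str(row.get(k) or "UNKNOWN").upper()  ('' and a missing key both coerce to "UNKNOWN");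
-- dict.get = first-match lookup in the association list
def pvStatus (row : List (String × String)) (k : String) : String :=
  PySem.Str.upper (match List.lookup k row with
    | some v => if v = "" then "UNKNOWN" else v
    | none => "UNKNOWN")

-- ===== PORT A =====
def derive_source_coverage_quality (coverage_json : List (String × List (List (String × String)))) : String :=
  let rows := match List.lookup "source_coverage" coverage_json with
    | some l => l
    | none => []
  if rows = [] then "LOW"
  else
    let statuses : PySem.Set String := PySem.Set.ofList (rows.map (fun row => pvStatus row "coverage_status"))
    let freshness : PySem.Set String := PySem.Set.ofList (rows.map (fun row => pvStatus row "freshness_status"))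
    if PySem.Set.contains statuses "MISSING" then "LOW"
    else if PySem.Set.contains statuses "PARTIAL" || PySem.Set.contains freshness "STALE" || PySem.Set.contains freshness "UNKNOWN" then "MEDIUM"
    else "HIGH"

-- ===== PORT B =====
def pvRowQuality (row : List (String × String)) : Nat :=
  let status := pvStatus row "coverage_status"
  if status = "MISSING" then 0
  else
    let fresh := pvStatus row "freshness_status"
    if status = "PARTIAL" || fresh = "STALE" || fresh = "UNKNOWN" then 1 else 2

def derive_source_coverage_quality_alt (coverage_json : List (String × List (List (String × String)))) : String :=
  let rows := match List.lookup "source_coverage" coverage_json with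
    | some l => l
    | none => []
  match rows.map pvRowQuality with
  | [] => "LOW"
  | q :: qs => List.getD ["LOW", "MEDIUM", "HIGH"] (qs.foldl Nat.min q) "LOW"

-- ===== PRECONDITION & SPEC =====
def Spec_derive_source_coverage_quality (coverage_json : List (String × List (List (String × String)))) (out : String) : Prop := out = derive_source_coverage_quality_alt coverage_json
instance (coverage_json : List (String × List (List (String × String)))) (out : String) : Decidable (Spec_derive_source_coverage_quality coverage_json out) := by unfold Spec_derive_source_coverage_quality; infer_instance

-- ===== CLAIM (what is proved, stated in full; the proofs are below) =====
def Claim_equal_derive_source_coverage_quality : Prop := ∀ (coverage_json : List (String × List (List (String × String)))), Dom_derive_source_coverage_quality coverage_json → Spec_derive_source_coverage_quality coverage_json (derive_source_coverage_quality coverage_json)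

-- ===== LEMMAS AND PROOFS =====

theorem pvRowQuality_le (row : List (String × String)) : pvRowQuality row ≤ 2 := by
  unfold pvRowQuality; dsimp only; split_ifs <;> omega

theorem pvRowQuality_eq_zero (row : List (String × String)) :
    pvRowQuality row = 0 ↔ pvStatus row "coverage_status" = "MISSING" := by
  unfold pvRowQuality; dsimp only; split_ifs with h1 h2 <;> simp_all

theorem pvRowQuality_eq_one (row : List (String × String)) :
    pvRowQuality row = 1 ↔ (¬ pvStatus row "coverage_status" = "MISSING" ∧
      (pvStatus row "coverage_status" = "PARTIAL" ∨ pvStatus row "freshness_status" = "STALE" ∨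
       pvStatus row "freshness_status" = "UNKNOWN")) := by
  unfold pvRowQuality; dsimp only; split_ifs with h1 h2 <;> simp_all; tauto

theorem minfold_char (qs : List Nat) (q : Nat) (hq : q ≤ 2) (h : ∀ x ∈ qs, x ≤ 2) :
    qs.foldl Nat.min q = if q = 0 ∨ 0 ∈ qs then 0 else if q = 1 ∨ 1 ∈ qs then 1 else 2 := by
  induction qs generalizing q with
  | nil => simp; split_ifs <;> omega
  | cons x xs ih =>
    have hx : x ≤ 2 := h x (by simp)
    have := ih (Nat.min q x) (le_trans (Nat.min_le_left _ _) hq) (fun y hy => h y (by simp [hy]))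
    simp only [List.foldl_cons, this, List.mem_cons]
    by_cases h0 : 0 ∈ xs <;> by_cases h1 : 1 ∈ xs <;>
      simp [h0, h1, Nat.min_def] <;> split_ifs <;> omega

theorem derive_spec_aux (r : List (String × String)) (rs : List (List (String × String))) :
    (if PySem.Set.contains (PySem.Set.ofList ((r :: rs).map (fun row => pvStatus row "coverage_status"))) "MISSING" then "LOW"
     else if PySem.Set.contains (PySem.Set.ofList ((r :: rs).map (fun row => pvStatus row "coverage_status"))) "PARTIAL"
          || PySem.Set.contains (PySem.Set.ofList ((r :: rs).map (fun row => pvStatus row "freshness_status"))) "STALE"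
          || PySem.Set.contains (PySem.Set.ofList ((r :: rs).map (fun row => pvStatus row "freshness_status"))) "UNKNOWN" then "MEDIUM"
     else "HIGH")
    = List.getD ["LOW", "MEDIUM", "HIGH"] ((rs.map pvRowQuality).foldl Nat.min (pvRowQuality r)) "LOW" := by
  rw [minfold_char _ _ (pvRowQuality_le r)
    (by intro x hx; obtain ⟨y, _, rfl⟩ := List.mem_map.mp hx; exact pvRowQuality_le y)]
  have hmem : ∀ (s k : String),
      (PySem.Set.contains (PySem.Set.ofList ((r :: rs).map (fun row => pvStatus row k))) s = true)
        ↔ ∃ row ∈ r :: rs, pvStatus row k = s := by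
    intro s k
    rw [PySem.Set.contains_iff, PySem.Set.mem_ofList, List.mem_map]
  by_cases hM : ∃ row ∈ r :: rs, pvStatus row "coverage_status" = "MISSING"
  · have h0 : pvRowQuality r = 0 ∨ 0 ∈ rs.map pvRowQuality := by
      obtain ⟨row, hrow, hst⟩ := hM
      rcases List.mem_cons.mp hrow with rfl | hrs
      · exact Or.inl ((pvRowQuality_eq_zero row).mpr hst)
      · exact Or.inr (List.mem_map.mpr ⟨row, hrs, (pvRowQuality_eq_zero row).mpr hst⟩)
    rw [if_pos ((hmem _ _).mpr hM), if_pos h0]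
    rfl
  · have hM' : ∀ row ∈ r :: rs, ¬ pvStatus row "coverage_status" = "MISSING" := by
      intro row hrow hc; exact hM ⟨row, hrow, hc⟩
    have h0 : ¬ (pvRowQuality r = 0 ∨ 0 ∈ rs.map pvRowQuality) := by
      rintro (h | h)
      · exact hM' r (by simp) ((pvRowQuality_eq_zero r).mp h)
      · obtain ⟨row, hrs, hq⟩ := List.mem_map.mp h
        exact hM' row (by simp [hrs]) ((pvRowQuality_eq_zero row).mp hq)
    rw [if_neg (fun hc => hM ((hmem _ _).mp hc)), if_neg h0]
    by_cases hMed : (∃ row ∈ r :: rs, pvStatus row "coverage_status" = "PARTIAL") ∨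
        (∃ row ∈ r :: rs, pvStatus row "freshness_status" = "STALE") ∨
        (∃ row ∈ r :: rs, pvStatus row "freshness_status" = "UNKNOWN")
    · have h1 : pvRowQuality r = 1 ∨ 1 ∈ rs.map pvRowQuality := by
        have : ∃ row ∈ r :: rs, (pvStatus row "coverage_status" = "PARTIAL" ∨
            pvStatus row "freshness_status" = "STALE" ∨ pvStatus row "freshness_status" = "UNKNOWN") := by
          rcases hMed with ⟨row, hrow, hc⟩ | ⟨row, hrow, hc⟩ | ⟨row, hrow, hc⟩
          · exact ⟨row, hrow, Or.inl hc⟩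
          · exact ⟨row, hrow, Or.inr (Or.inl hc)⟩
          · exact ⟨row, hrow, Or.inr (Or.inr hc)⟩
        obtain ⟨row, hrow, hc⟩ := this
        have hq1 : pvRowQuality row = 1 := (pvRowQuality_eq_one row).mpr ⟨hM' row hrow, hc⟩
        rcases List.mem_cons.mp hrow with rfl | hrs
        · exact Or.inl hq1
        · exact Or.inr (List.mem_map.mpr ⟨row, hrs, hq1⟩)
      have hA : (PySem.Set.contains (PySem.Set.ofList ((r :: rs).map (fun row => pvStatus row "coverage_status"))) "PARTIAL"
          || PySem.Set.contains (PySem.Set.ofList ((r :: rs).map (fun row => pvStatus row "freshness_status"))) "STALE"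
          || PySem.Set.contains (PySem.Set.ofList ((r :: rs).map (fun row => pvStatus row "freshness_status"))) "UNKNOWN") = true := by
        rw [Bool.or_eq_true, Bool.or_eq_true]
        rcases hMed with h | h | h
        · exact Or.inl (Or.inl ((hmem _ _).mpr h))
        · exact Or.inl (Or.inr ((hmem _ _).mpr h))
        · exact Or.inr ((hmem _ _).mpr h)
      rw [if_pos hA, if_pos h1]
      rfl
    · have h1 : ¬ (pvRowQuality r = 1 ∨ 1 ∈ rs.map pvRowQuality) := by
        have hrow1 : ∀ row ∈ r :: rs, pvRowQuality row ≠ 1 := by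
          intro row hrow hq
          rcases ((pvRowQuality_eq_one row).mp hq).2 with hc | hc | hc
          · exact hMed (Or.inl ⟨row, hrow, hc⟩)
          · exact hMed (Or.inr (Or.inl ⟨row, hrow, hc⟩))
          · exact hMed (Or.inr (Or.inr ⟨row, hrow, hc⟩))
        rintro (h | h)
        · exact hrow1 r (by simp) h
        · obtain ⟨row, hrs, hq⟩ := List.mem_map.mp h
          exact hrow1 row (by simp [hrs]) hq
      have hA : ¬ ((PySem.Set.contains (PySem.Set.ofList ((r :: rs).map (fun row => pvStatus row "coverage_status"))) "PARTIAL"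
          || PySem.Set.contains (PySem.Set.ofList ((r :: rs).map (fun row => pvStatus row "freshness_status"))) "STALE"
          || PySem.Set.contains (PySem.Set.ofList ((r :: rs).map (fun row => pvStatus row "freshness_status"))) "UNKNOWN") = true) := by
        rw [Bool.or_eq_true, Bool.or_eq_true]
        rintro ((h | h) | h)
        · exact hMed (Or.inl ((hmem _ _).mp h))
        · exact hMed (Or.inr (Or.inl ((hmem _ _).mp h)))
        · exact hMed (Or.inr (Or.inr ((hmem _ _).mp h)))
      rw [if_neg hA, if_neg h1]
      rfl

-- ===== VERDICT (by name: the statement is the Claim_ definition above) =====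
theorem derive_source_coverage_quality_spec : Claim_equal_derive_source_coverage_quality := by
  intro coverage_json _
  unfold Spec_derive_source_coverage_quality derive_source_coverage_quality derive_source_coverage_quality_alt
  cases h : List.lookup "source_coverage" coverage_json with
  | none => simp
  | some l =>
    cases l with
    | nil => simp
    | cons r rs =>
      rw [if_neg (by simp)]
      simpa using derive_spec_aux r rs
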